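-- pv_equiv track=rewrite | github.com/simeonborko/compounds-blends-competition-thesis | src/tools/overlapable.py | matrix_to_diamond
-- ===== SOURCE A (Python) =====
-- def matrix_to_diamond(matrix) -> (tuple, tuple):
--     """
--     Prevod matice na diamant. Diagonaly matice su riadky diamantu.
--     Priklad:
--     Matica:
--         . . . . . .
--         . . . . 1 .
--         . . . 1 . .
--         . 1 . . . .
--         1 . . . . .
--     Diamant:
--         .
--         . .
--         . . .
--         . . . .
--         1 1 . . .
--         . . 1 1 .
--         . . . .
--         . . .
--         . .
--         .
--     """
--     matrix_rows = len(matrix)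
--     matrix_cols = len(matrix[0])
--     diamond_rows = matrix_rows + matrix_cols - 1
--     diamond = []
--     diamond_to_matrix = []
--     for drow in range(diamond_rows):
--         mrow = min(drow, matrix_rows - 1)
--         mcol = drow - mrow
--         items = []
--         indices_items = []
--         while mrow >= 0 and mcol < matrix_cols:
--             items.append(matrix[mrow][mcol])
--             indices_items.append((mrow, mcol))
--             mrow -= 1
--             mcol += 1
--         diamond.append(tuple(items))
--         diamond_to_matrix.append(tuple(indices_items))
--     return tuple(diamond), tuple(diamond_to_matrix)
-- ===== SOURCE B (Python) =====
-- def matrix_to_diamond(matrix) -> (tuple, tuple):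
--     rows = len(matrix)
--     cols = len(matrix[0])
--     diamond_rows = rows + cols - 1
--     vals = [[] for _ in range(diamond_rows)]
--     idxs = [[] for _ in range(diamond_rows)]
--     for r in range(rows - 1, -1, -1):
--         row = matrix[r]
--         for c in range(cols):
--             vals[r + c].append(row[c])
--             idxs[r + c].append((r, c))
--     return tuple(tuple(v) for v in vals), tuple(tuple(i) for i in idxs)
-- ===== Notes on version B (the rewrite author's own statement) =====
-- stated objective: alternative
-- what changed: Replaces the per-diagonal gather (outer loop over diamond rows with an inner while-walk along each anti-diagonal) by a single row-major scatter pass that appends each cell into a preallocated bucket per anti-diagonal, iterating rows in descending order to reproduce A's within-diagonal order.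
import Mathlib
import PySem

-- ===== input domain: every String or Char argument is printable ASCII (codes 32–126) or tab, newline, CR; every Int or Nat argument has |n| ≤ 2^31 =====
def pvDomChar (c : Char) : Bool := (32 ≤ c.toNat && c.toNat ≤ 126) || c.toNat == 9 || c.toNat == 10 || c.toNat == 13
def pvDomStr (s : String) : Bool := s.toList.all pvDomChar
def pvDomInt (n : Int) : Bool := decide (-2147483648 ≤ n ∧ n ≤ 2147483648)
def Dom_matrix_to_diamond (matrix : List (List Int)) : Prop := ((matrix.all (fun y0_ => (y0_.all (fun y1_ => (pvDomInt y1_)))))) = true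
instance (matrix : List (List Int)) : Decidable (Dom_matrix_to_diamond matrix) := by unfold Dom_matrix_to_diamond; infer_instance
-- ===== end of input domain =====

-- B replaces A's per-diagonal gather walk by a single row-major scatter pass into preallocated per-diagonal buckets (alternative decomposition, same cost).

-- ===== PORT A =====
-- the inner 'while mrow >= 0 and mcol < matrix_cols' loop; fuel bounds the iteration count (mrow decreases each step)
def mtdInner (matrix : List (List Int)) (C : Int) :
    Nat → Int → Int → List Int → List (Int × Int) → List Int × List (Int × Int)
  | 0, _, _, items, idxs => (items, idxs)
  | fuel + 1, mrow, mcol, items, idxs =>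
    if 0 ≤ mrow ∧ mcol < C then
      mtdInner matrix C fuel (mrow - 1) (mcol + 1)
        (items ++ [PySem.List.pyGetD (PySem.List.pyGetD matrix mrow []) mcol 0])
        (idxs ++ [(mrow, mcol)])
    else (items, idxs)

def matrix_to_diamond (matrix : List (List Int)) : List (List Int) × (List (List (Int × Int))) :=
  let matrix_rows : Int := matrix.length
  let matrix_cols : Int := (PySem.List.pyGetD matrix 0 []).length
  let diamond_rows : Int := matrix_rows + matrix_cols - 1
  (PySem.List.pyRange 0 diamond_rows 1).foldl
    (fun acc drow =>
      let mrow := min drow (matrix_rows - 1)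
      let mcol := drow - mrow
      let r := mtdInner matrix matrix_cols (mrow.toNat + 1) mrow mcol [] []
      (acc.1 ++ [r.1], acc.2 ++ [r.2]))
    ([], [])

-- ===== PORT B =====
-- one cell of the scatter pass: 'vals[r+c].append(row[c]); idxs[r+c].append((r,c))'
def scatCell (row : List Int) (r : Int)
    (acc2 : List (List Int) × List (List (Int × Int))) (c : Int) :
    List (List Int) × List (List (Int × Int)) :=
  (PySem.List.pySetD acc2.1 (r + c) (PySem.List.pyGetD acc2.1 (r + c) [] ++ [PySem.List.pyGetD row c 0]),
   PySem.List.pySetD acc2.2 (r + c) (PySem.List.pyGetD acc2.2 (r + c) [] ++ [(r, c)]))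

-- one row of the scatter pass: 'row = matrix[r]; for c in range(cols): …'
def scatRow (matrix : List (List Int)) (cols : Int)
    (acc : List (List Int) × List (List (Int × Int))) (r : Int) :
    List (List Int) × List (List (Int × Int)) :=
  (PySem.List.pyRange 0 cols 1).foldl (scatCell (PySem.List.pyGetD matrix r []) r) acc

def matrix_to_diamond_alt (matrix : List (List Int)) : List (List Int) × (List (List (Int × Int))) :=
  let rows : Int := matrix.length
  let cols : Int := (PySem.List.pyGetD matrix 0 []).length
  let diamond_rows : Int := rows + cols - 1
  let vals0 : List (List Int) := (PySem.List.pyRange 0 diamond_rows 1).map (fun _ => [])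
  let idxs0 : List (List (Int × Int)) := (PySem.List.pyRange 0 diamond_rows 1).map (fun _ => [])
  (PySem.List.pyRange (rows - 1) (-1) (-1)).foldl (scatRow matrix cols) (vals0, idxs0)

-- ===== PRECONDITION & SPEC =====
-- Pre_ excludes exactly the inputs where A raises IndexError: the empty matrix (matrix[0])
-- and ragged matrices with a row shorter than the first row (matrix[mrow][mcol]); B raises there too.
def Pre_matrix_to_diamond (matrix : List (List Int)) : Prop :=
  matrix ≠ [] ∧ ∀ row ∈ matrix, matrix.headI.length ≤ row.length
instance (matrix : List (List Int)) : Decidable (Pre_matrix_to_diamond matrix) := by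
  unfold Pre_matrix_to_diamond; infer_instance

def pvWitness_matrix_to_diamond : List (List Int) := [[1, 2], [3, 4]]

def Spec_matrix_to_diamond (matrix : List (List Int)) (out : List (List Int) × (List (List (Int × Int)))) : Prop := out = matrix_to_diamond_alt matrix
instance (matrix : List (List Int)) (out : List (List Int) × (List (List (Int × Int)))) : Decidable (Spec_matrix_to_diamond matrix out) := by unfold Spec_matrix_to_diamond; infer_instance

-- ===== CLAIM (what is proved, stated in full; the proofs are below) =====
def Claim_equal_matrix_to_diamond : Prop := ∀ (matrix : List (List Int)), Dom_matrix_to_diamond matrix → Pre_matrix_to_diamond matrix → Spec_matrix_to_diamond matrix (matrix_to_diamond matrix)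

-- ===== LEMMAS AND PROOFS =====

-- the cell value both programs read at (r, c)
def mtdEntry (matrix : List (List Int)) (r c : Int) : Int :=
  PySem.List.pyGetD (PySem.List.pyGetD matrix r []) c 0

-- rows of anti-diagonal d visited starting from row s, descending
def mtdRows (C d s : Int) : List Int :=
  PySem.List.pyRange (min s d) (max (-1) (d - C)) (-1)

-- per-diagonal value / index lists contributed by rows s, s-1, …, 0
def mtdContribV (matrix : List (List Int)) (C j s : Int) : List Int :=
  (mtdRows C j s).map (fun r => mtdEntry matrix r (j - r))
def mtdContribI (C j s : Int) : List (Int × Int) :=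
  (mtdRows C j s).map (fun r => (r, j - r))

theorem mtdRows_cons (C d s : Int) (h1 : 0 ≤ s) (h2 : s ≤ d) (h3 : d - s < C) :
    mtdRows C d s = s :: mtdRows C d (s - 1) := by
  unfold mtdRows
  have hm : min s d = s := by omega
  have hm' : min (s - 1) d = s - 1 := by omega
  rw [hm, hm', PySem.List.pyRange_neg_one_cons (by omega)]

theorem mtdRows_nil (C d s : Int) (h : ¬ (0 ≤ s ∧ d - s < C)) (h2 : s ≤ d) :
    mtdRows C d s = [] := by
  unfold mtdRows
  exact PySem.List.pyRange_neg_one_eq_nil (by omega)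

theorem mtdRows_skip (C d s : Int) (h : ¬ (s ≤ d ∧ d < s + C)) :
    mtdRows C d s = mtdRows C d (s - 1) := by
  unfold mtdRows
  by_cases hds : d < s
  · have h2' : min (s - 1) d = min s d := by omega
    rw [h2']
  · have h1' : min s d = s := by omega
    have h2' : min (s - 1) d = s - 1 := by omega
    rw [h1', h2', PySem.List.pyRange_neg_one_eq_nil (by omega),
      PySem.List.pyRange_neg_one_eq_nil (by omega)]

theorem mtdInner_eq (matrix : List (List Int)) (C d : Int) :
    ∀ (fuel : Nat) (s : Int) (items : List Int) (idxs : List (Int × Int)),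
      s < fuel → s ≤ d →
      mtdInner matrix C fuel s (d - s) items idxs =
        (items ++ (mtdRows C d s).map (fun r => mtdEntry matrix r (d - r)),
         idxs ++ (mtdRows C d s).map (fun r => (r, d - r))) := by
  intro fuel
  induction fuel with
  | zero =>
    intro s items idxs h1 h2
    rw [mtdRows_nil C d s (by omega) h2]
    simp [mtdInner]
  | succ k ih =>
    intro s items idxs h1 h2
    by_cases hc : 0 ≤ s ∧ d - s < C
    · have hrw : d - s + 1 = d - (s - 1) := by ring
      have hrec := ih (s - 1)
        (items ++ [PySem.List.pyGetD (PySem.List.pyGetD matrix s []) (d - s) 0])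
        (idxs ++ [(s, d - s)]) (by omega) (by omega)
      rw [mtdRows_cons C d s hc.1 h2 hc.2]
      simp only [mtdInner, if_pos hc, hrw, hrec, List.map_cons, List.append_assoc,
        List.cons_append, List.nil_append, mtdEntry]
    · rw [mtdRows_nil C d s hc h2]
      simp [mtdInner, if_neg hc]

-- per-diagonal characterisation of A's inner walk
theorem mtdItem_eq (matrix : List (List Int)) (C d : Int) (hd : 0 ≤ d) (hR : matrix ≠ []) :
    mtdInner matrix C ((min d ((matrix.length : Int) - 1)).toNat + 1)
        (min d ((matrix.length : Int) - 1)) (d - min d ((matrix.length : Int) - 1)) [] [] =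
      (mtdContribV matrix C d ((matrix.length : Int) - 1),
       mtdContribI C d ((matrix.length : Int) - 1)) := by
  have hlen : 1 ≤ matrix.length := List.length_pos_iff.mpr hR
  set s := min d ((matrix.length : Int) - 1) with hsdef
  have hs0 : 0 ≤ s := by omega
  rw [mtdInner_eq matrix C d (s.toNat + 1) s [] [] (by omega) (by omega)]
  have hrows : mtdRows C d s = mtdRows C d ((matrix.length : Int) - 1) := by
    unfold mtdRows
    have : min s d = min ((matrix.length : Int) - 1) d := by omega
    rw [this]
  rw [hrows]
  simp [mtdContribV, mtdContribI]

-- one row of the scatter pass appends the row's cell to each bucket it hits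
theorem scatter_inner (matrix : List (List Int)) (r N : Int) (hr : 0 ≤ r) :
    ∀ (cols : Nat) (vals : List (List Int)) (idxs : List (List (Int × Int))),
      (vals.length : Int) = N → (idxs.length : Int) = N → r + cols ≤ N →
      (((PySem.List.pyRange 0 (cols : Int) 1).foldl
          (scatCell (PySem.List.pyGetD matrix r []) r) (vals, idxs)).1.length : Int) = N ∧
      (((PySem.List.pyRange 0 (cols : Int) 1).foldl
          (scatCell (PySem.List.pyGetD matrix r []) r) (vals, idxs)).2.length : Int) = N ∧
      ∀ j : Nat, (j : Int) < N →
        ((PySem.List.pyRange 0 (cols : Int) 1).foldl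
          (scatCell (PySem.List.pyGetD matrix r []) r) (vals, idxs)).1.getD j [] =
            vals.getD j [] ++ (if r ≤ (j : Int) ∧ (j : Int) < r + cols then [mtdEntry matrix r ((j : Int) - r)] else []) ∧
        ((PySem.List.pyRange 0 (cols : Int) 1).foldl
          (scatCell (PySem.List.pyGetD matrix r []) r) (vals, idxs)).2.getD j [] =
            idxs.getD j [] ++ (if r ≤ (j : Int) ∧ (j : Int) < r + cols then [(r, (j : Int) - r)] else []) := by
  intro cols
  induction cols with
  | zero =>
    intro vals idxs hv hi hrc
    have hnil : PySem.List.pyRange 0 ((0 : Nat) : Int) 1 = [] := by simp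
    rw [hnil]
    refine ⟨by simpa using hv, by simpa using hi, ?_⟩
    intro j hj
    constructor <;> · rw [if_neg (by omega)]; simp
  | succ k ih =>
    intro vals idxs hv hi hrc
    have hcast : ((k + 1 : Nat) : Int) = (k : Int) + 1 := by push_cast; ring
    have hsplit : PySem.List.pyRange 0 ((k + 1 : Nat) : Int) 1 =
        PySem.List.pyRange 0 (k : Int) 1 ++ [(k : Int)] := by
      rw [hcast]; exact PySem.List.pyRange_one_succ_right (by omega)
    rw [hsplit, List.foldl_append, List.foldl_cons, List.foldl_nil]
    obtain ⟨hl1, hl2, hval⟩ := ih vals idxs hv hi (by omega)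
    set res := (PySem.List.pyRange 0 (k : Int) 1).foldl
      (scatCell (PySem.List.pyGetD matrix r []) r) (vals, idxs) with hres
    have hidx : (0 : Int) ≤ r + k := by omega
    have hidxN : r + (k : Int) < N := by omega
    simp only [scatCell, PySem.List.pySetD_of_nonneg _ _ hidx]
    refine ⟨by simpa using hl1, by simpa using hl2, ?_⟩
    intro j hj
    obtain ⟨h1, h2⟩ := hval j hj
    have hjl1 : j < res.1.length := by omega
    have hjl2 : j < res.2.length := by omega
    by_cases hjk : (j : Int) = r + k
    · have htn : (r + (k : Int)).toNat = j := by omega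
      have hget1 : PySem.List.pyGetD res.1 (r + (k : Int)) [] = res.1.getD j [] := by
        rw [PySem.List.pyGetD_eq_getElem _ _ hidx (by omega)]
        simp only [htn]
        rw [List.getD_eq_getElem _ _ hjl1]
      have hget2 : PySem.List.pyGetD res.2 (r + (k : Int)) [] = res.2.getD j [] := by
        rw [PySem.List.pyGetD_eq_getElem _ _ hidx (by omega)]
        simp only [htn]
        rw [List.getD_eq_getElem _ _ hjl2]
      refine ⟨?_, ?_⟩
      · rw [htn, hget1]
        rw [List.getD_eq_getElem _ _ (by simpa using hjl1), List.getElem_set_self]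
        rw [h1, if_neg (by omega), if_pos (by constructor <;> omega)]
        simp only [List.append_nil]
        have hjr : (j : Int) - r = (k : Int) := by omega
        rw [hjr, mtdEntry]
      · rw [htn, hget2]
        rw [List.getD_eq_getElem _ _ (by simpa using hjl2), List.getElem_set_self]
        rw [h2, if_neg (by omega), if_pos (by constructor <;> omega)]
        simp only [List.append_nil]
        have hjr : (j : Int) - r = (k : Int) := by omega
        rw [hjr]
    · have htn : (r + (k : Int)).toNat ≠ j := by omega
      refine ⟨?_, ?_⟩
      · rw [List.getD_eq_getElem _ _ (by simpa using hjl1),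
          List.getElem_set_ne htn, ← List.getD_eq_getElem res.1 _ hjl1, h1]
        by_cases hin : r ≤ (j : Int) ∧ (j : Int) < r + k
        · rw [if_pos hin, if_pos (by omega)]
        · rw [if_neg hin, if_neg (by omega)]
      · rw [List.getD_eq_getElem _ _ (by simpa using hjl2),
          List.getElem_set_ne htn, ← List.getD_eq_getElem res.2 _ hjl2, h2]
        by_cases hin : r ≤ (j : Int) ∧ (j : Int) < r + k
        · rw [if_pos hin, if_pos (by omega)]
        · rw [if_neg hin, if_neg (by omega)]

-- the whole scatter pass, rows s down to 0
theorem scatter_outer (matrix : List (List Int)) (colsN : Nat) (N : Int) :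
    ∀ (m : Nat) (s : Int), (s + 1).toNat = m → s + (colsN : Int) ≤ N →
      ∀ (vals : List (List Int)) (idxs : List (List (Int × Int))),
      (vals.length : Int) = N → (idxs.length : Int) = N →
      ((((PySem.List.pyRange s (-1) (-1)).foldl (scatRow matrix colsN) (vals, idxs)).1.length : Int) = N ∧
       (((PySem.List.pyRange s (-1) (-1)).foldl (scatRow matrix colsN) (vals, idxs)).2.length : Int) = N ∧
       ∀ j : Nat, (j : Int) < N →
        ((PySem.List.pyRange s (-1) (-1)).foldl (scatRow matrix colsN) (vals, idxs)).1.getD j [] =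
          vals.getD j [] ++ mtdContribV matrix colsN j s ∧
        ((PySem.List.pyRange s (-1) (-1)).foldl (scatRow matrix colsN) (vals, idxs)).2.getD j [] =
          idxs.getD j [] ++ mtdContribI colsN j s) := by
  intro m
  induction m with
  | zero =>
    intro s hs hcol vals idxs hv hi
    have hnil : PySem.List.pyRange s (-1) (-1) = [] :=
      PySem.List.pyRange_neg_one_eq_nil (by omega)
    rw [hnil]
    refine ⟨by simpa using hv, by simpa using hi, ?_⟩
    intro j hj
    have hro : mtdRows (colsN : Int) (j : Int) s = [] := by
      unfold mtdRows
      exact PySem.List.pyRange_neg_one_eq_nil (by omega)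
    simp [mtdContribV, mtdContribI, hro]
  | succ m ih =>
    intro s hs hcol vals idxs hv hi
    have hs0 : 0 ≤ s := by omega
    have hcons : PySem.List.pyRange s (-1) (-1) = s :: PySem.List.pyRange (s - 1) (-1) (-1) :=
      PySem.List.pyRange_neg_one_cons (by omega)
    rw [hcons, List.foldl_cons]
    obtain ⟨hl1, hl2, hval⟩ := scatter_inner matrix s N hs0 colsN vals idxs hv hi (by omega)
    have hmid : scatRow matrix (colsN : Int) (vals, idxs) s =
        (PySem.List.pyRange 0 (colsN : Int) 1).foldl
          (scatCell (PySem.List.pyGetD matrix s []) s) (vals, idxs) := rfl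
    set mid := (PySem.List.pyRange 0 (colsN : Int) 1).foldl
      (scatCell (PySem.List.pyGetD matrix s []) s) (vals, idxs) with hmd
    rw [hmid]
    have hpair : mid = (mid.1, mid.2) := rfl
    rw [hpair]
    obtain ⟨hl1', hl2', hval'⟩ := ih (s - 1) (by omega) (by omega) mid.1 mid.2 hl1 hl2
    refine ⟨hl1', hl2', ?_⟩
    intro j hj
    obtain ⟨ha1, ha2⟩ := hval' j hj
    obtain ⟨hb1, hb2⟩ := hval j hj
    constructor
    · rw [ha1, hb1, List.append_assoc]
      congr 1
      unfold mtdContribV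
      by_cases hin : s ≤ (j : Int) ∧ (j : Int) < s + colsN
      · rw [if_pos hin, mtdRows_cons _ _ _ hs0 (by omega) (by omega)]
        simp
      · rw [if_neg hin, mtdRows_skip _ _ _ hin]
        simp
    · rw [ha2, hb2, List.append_assoc]
      congr 1
      unfold mtdContribI
      by_cases hin : s ≤ (j : Int) ∧ (j : Int) < s + colsN
      · rw [if_pos hin, mtdRows_cons _ _ _ hs0 (by omega) (by omega)]
        simp
      · rw [if_neg hin, mtdRows_skip _ _ _ hin]
        simp

-- closed form of A
theorem A_char (matrix : List (List Int)) (hR : matrix ≠ []) :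
    matrix_to_diamond matrix =
      ((PySem.List.pyRange 0 ((matrix.length : Int) + ((PySem.List.pyGetD matrix 0 []).length : Int) - 1) 1).map
          (fun d => mtdContribV matrix ((PySem.List.pyGetD matrix 0 []).length : Int) d ((matrix.length : Int) - 1)),
       (PySem.List.pyRange 0 ((matrix.length : Int) + ((PySem.List.pyGetD matrix 0 []).length : Int) - 1) 1).map
          (fun d => mtdContribI ((PySem.List.pyGetD matrix 0 []).length : Int) d ((matrix.length : Int) - 1))) := by
  unfold matrix_to_diamond
  simp only []
  rw [PySem.List.foldl_prod_mk
    (f := fun acc drow => acc ++ [(mtdInner matrix ((PySem.List.pyGetD matrix 0 []).length : Int)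
      ((min drow ((matrix.length : Int) - 1)).toNat + 1) (min drow ((matrix.length : Int) - 1))
      (drow - min drow ((matrix.length : Int) - 1)) [] []).1])
    (g := fun acc drow => acc ++ [(mtdInner matrix ((PySem.List.pyGetD matrix 0 []).length : Int)
      ((min drow ((matrix.length : Int) - 1)).toNat + 1) (min drow ((matrix.length : Int) - 1))
      (drow - min drow ((matrix.length : Int) - 1)) [] []).2])]
  rw [PySem.List.foldl_append_singleton_eq_map, PySem.List.foldl_append_singleton_eq_map]
  rw [List.nil_append, List.nil_append]
  refine Prod.ext ?_ ?_
  · apply List.map_congr_left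
    intro d hd
    have hd0 : 0 ≤ d := ((PySem.List.mem_pyRange_one).mp hd).1
    rw [mtdItem_eq matrix _ d hd0 hR]
  · apply List.map_congr_left
    intro d hd
    have hd0 : 0 ≤ d := ((PySem.List.mem_pyRange_one).mp hd).1
    rw [mtdItem_eq matrix _ d hd0 hR]

-- closed form of B
theorem B_char (matrix : List (List Int)) (hR : matrix ≠ []) :
    matrix_to_diamond_alt matrix =
      ((PySem.List.pyRange 0 ((matrix.length : Int) + ((PySem.List.pyGetD matrix 0 []).length : Int) - 1) 1).map
          (fun d => mtdContribV matrix ((PySem.List.pyGetD matrix 0 []).length : Int) d ((matrix.length : Int) - 1)),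
       (PySem.List.pyRange 0 ((matrix.length : Int) + ((PySem.List.pyGetD matrix 0 []).length : Int) - 1) 1).map
          (fun d => mtdContribI ((PySem.List.pyGetD matrix 0 []).length : Int) d ((matrix.length : Int) - 1))) := by
  have hlen : 1 ≤ matrix.length := List.length_pos_iff.mpr hR
  set C0 : Nat := (PySem.List.pyGetD matrix 0 []).length with hC0
  set n : Int := (matrix.length : Int) + (C0 : Int) - 1 with hn
  have hn0 : 0 ≤ n := by omega
  have hlenR : ((PySem.List.pyRange 0 n 1).length : Int) = n := by
    rw [PySem.List.length_pyRange_one]; omega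
  have hv0 : (((PySem.List.pyRange 0 n 1).map (fun _ => ([] : List Int))).length : Int) = n := by
    rw [List.length_map]; exact hlenR
  have hi0 : (((PySem.List.pyRange 0 n 1).map (fun _ => ([] : List (Int × Int)))).length : Int) = n := by
    rw [List.length_map]; exact hlenR
  obtain ⟨h1, h2, h3⟩ := scatter_outer matrix C0 n matrix.length ((matrix.length : Int) - 1)
    (by omega) (by omega) _ _ hv0 hi0
  unfold matrix_to_diamond_alt
  simp only []
  rw [← hC0, ← hn]
  have hgd0v : ∀ j : Nat, ((PySem.List.pyRange 0 n 1).map (fun _ => ([] : List Int))).getD j [] = [] := by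
    intro j
    rcases Nat.lt_or_ge j ((PySem.List.pyRange 0 n 1).map (fun _ => ([] : List Int))).length with h | h
    · rw [List.getD_eq_getElem _ _ h]; simp
    · exact List.getD_eq_default _ _ h
  have hgd0i : ∀ j : Nat, ((PySem.List.pyRange 0 n 1).map (fun _ => ([] : List (Int × Int)))).getD j [] = [] := by
    intro j
    rcases Nat.lt_or_ge j ((PySem.List.pyRange 0 n 1).map (fun _ => ([] : List (Int × Int)))).length with h | h
    · rw [List.getD_eq_getElem _ _ h]; simp
    · exact List.getD_eq_default _ _ h
  refine Prod.ext ?_ ?_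
  · apply List.ext_getElem
    · rw [List.length_map]; omega
    · intro k hk hk'
      have hkn : (k : Int) < n := by
        have := hk; omega
      have hcontrib := (h3 k hkn).1
      rw [hgd0v k, List.nil_append] at hcontrib
      rw [← List.getD_eq_getElem _ _ hk, hcontrib]
      rw [List.getElem_map, PySem.List.getElem_pyRange_one]
      norm_num
  · apply List.ext_getElem
    · rw [List.length_map]; omega
    · intro k hk hk'
      have hkn : (k : Int) < n := by
        have := hk; omega
      have hcontrib := (h3 k hkn).2
      rw [hgd0i k, List.nil_append] at hcontrib
      rw [← List.getD_eq_getElem _ _ hk, hcontrib]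
      rw [List.getElem_map, PySem.List.getElem_pyRange_one]
      norm_num

-- ===== VERDICT (by name: the statement is the Claim_ definition above) =====
theorem matrix_to_diamond_spec : Claim_equal_matrix_to_diamond := by
  intro matrix _ hpre
  unfold Spec_matrix_to_diamond
  rw [A_char matrix hpre.1, B_char matrix hpre.1]
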